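-- pv_equiv track=rewrite | github.com/da03/criticize_text_generation | critique_coreference_chains/scripts/criticize/fit_critic.py | get_condition_next_word
-- ===== SOURCE A (Python) =====
-- def get_condition_next_word(ngram):
--     ngram_c = ngram[:-1]
--     next_word = ngram[-1]
--     ngram_reverse = []
--
--     items = ngram[0].split(':')
--
--     entity_ids = {}
--     if len(items) == 1:
--         current_entity_id = None
--     else:
--         assert len(items) == 2
--         current_entity_id = items[1]
--         entity_ids[current_entity_id] = len(entity_ids)
--     #ngram_reverse.append(f'{text}:{entity_ids[entity_id]}')
--     for w in ngram_c:
--         items = w.split(':')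
--         if len(items) == 1:
--             ngram_reverse.append(w)
--         else:
--             assert len(items) == 2
--             text, entity_id = items
--             if entity_id not in entity_ids:
--                 entity_ids[entity_id] = len(entity_ids)
--             ngram_reverse.append(f'{text}:{entity_ids[entity_id]}')
--     ngram_c = tuple(ngram_reverse)
--     #ngram_c_dict[ngram_c] += 1
--     #denominator = self.ngram_c_dict[ngram_c] + self.vocab_size * self.smoothing
--     items = next_word.split(':')
--     if len(items) == 1:
--         next_word = next_word
--     else:
--         assert len(items) == 2
--         text, entity_id = items
--         if entity_id not in entity_ids:
--             entity_ids[entity_id] = len(entity_ids)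
--         next_word = f'{text}:{entity_ids[entity_id]}'
--     #if ngram_c in self.ngram_c_dict:
--     #    if (ngram_c, next_word) not in self.ngram_c_word_dict:
--     #        print (ngram_c, next_word)
--     #numerator = self.ngram_c_word_dict[(ngram_c, next_word)] + self.smoothing
--     return ngram_c, next_word
-- ===== SOURCE B (Python) =====
-- def get_condition_next_word(ngram):
--     # Pass 1: build the complete first-appearance relabeling table over the whole ngram.
--     table = {}
--     for w in ngram:
--         items = w.split(':')
--         if len(items) != 1:
--             assert len(items) == 2
--             if items[1] not in table:
--                 table[items[1]] = len(table)
--     # Pass 2: rewrite every word through the completed table.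
--     result = []
--     for w in ngram:
--         items = w.split(':')
--         if len(items) == 1:
--             result.append(w)
--         else:
--             result.append(f'{items[0]}:{table[items[1]]}')
--     return tuple(result[:-1]), result[-1]
-- ===== Notes on version B (the rewrite author's own statement) =====
-- stated objective: simpler
-- what changed: Two-phase decomposition: one pass over the whole ngram builds the complete first-appearance relabeling table, a second pass applies it to every word, and the result is split into (tuple(result[:-1]), result[-1]); this replaces A's interleaved seed-then-assign-and-emit loop plus separate next_word handling and subsumes the redundant ngram[0] pre-seeding.
import Mathlib
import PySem

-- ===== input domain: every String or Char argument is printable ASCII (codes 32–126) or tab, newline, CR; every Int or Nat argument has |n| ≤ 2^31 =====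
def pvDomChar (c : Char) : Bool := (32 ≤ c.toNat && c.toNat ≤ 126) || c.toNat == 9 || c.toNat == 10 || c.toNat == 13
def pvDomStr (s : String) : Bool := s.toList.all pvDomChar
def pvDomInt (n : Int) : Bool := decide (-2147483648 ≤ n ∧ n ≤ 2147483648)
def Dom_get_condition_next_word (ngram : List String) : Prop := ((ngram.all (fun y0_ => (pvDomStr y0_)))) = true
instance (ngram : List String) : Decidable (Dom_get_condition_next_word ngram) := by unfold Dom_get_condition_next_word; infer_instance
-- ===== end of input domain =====

-- B splits A's interleaved relabel-and-emit loop into two phases — build the full first-appearance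
-- table in one pass, then rewrite every word through it — which subsumes A's ngram[0] pre-seeding
-- and its separate next_word branch (objective: simpler).


-- ===== PORT A =====
-- body of A's 'for w in ngram_c' loop: state = (entity_ids, ngram_reverse)
def gcnwA_emitStep (st : PySem.Dict String Int × List String) (w : String) :
    PySem.Dict String Int × List String :=
  let items := (PySem.Str.split? w ":").getD []
  if items.length = 1 then (st.1, st.2 ++ [w])
  else
    let text := items.getD 0 ""
    let entity_id := items.getD 1 ""
    let entity_ids := if st.1.contains entity_id then st.1
      else st.1.insert entity_id ((PySem.Dict.size st.1 : Int))
    (entity_ids, st.2 ++ [text ++ ":" ++ PySem.Int.toStr (entity_ids.getD entity_id 0)])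

def get_condition_next_word (ngram : List String) : List String × String :=
  let ngram_c := PySem.List.slice ngram none (some (-1))
  let next_word := (PySem.List.pyGet? ngram (-1)).getD ""
  let items0 := (PySem.Str.split? ((PySem.List.pyGet? ngram 0).getD "") ":").getD []
  let entity_ids : PySem.Dict String Int :=
    if items0.length = 1 then PySem.Dict.empty
    else PySem.Dict.empty.insert (items0.getD 1 "")
      ((PySem.Dict.size (PySem.Dict.empty : PySem.Dict String Int) : Int))
  let st := ngram_c.foldl gcnwA_emitStep (entity_ids, [])
  let items1 := (PySem.Str.split? next_word ":").getD []
  let next_word' :=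
    if items1.length = 1 then next_word
    else
      let entity_id := items1.getD 1 ""
      let entity_ids := if st.1.contains entity_id then st.1
        else st.1.insert entity_id ((PySem.Dict.size st.1 : Int))
      items1.getD 0 "" ++ ":" ++ PySem.Int.toStr (entity_ids.getD entity_id 0)
  (st.2, next_word')

-- ===== PORT B =====
-- pass 1 body: extend the relabeling table with w's entity id if new
def gcnwB_step (table : PySem.Dict String Int) (w : String) : PySem.Dict String Int :=
  let items := (PySem.Str.split? w ":").getD []
  if items.length ≠ 1 then
    if table.contains (items.getD 1 "") then table
    else table.insert (items.getD 1 "") ((PySem.Dict.size table : Int))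
  else table

-- pass 2 body: rewrite one word through the completed table
def gcnwB_apply (table : PySem.Dict String Int) (w : String) : String :=
  let items := (PySem.Str.split? w ":").getD []
  if items.length = 1 then w
  else items.getD 0 "" ++ ":" ++ PySem.Int.toStr (table.getD (items.getD 1 "") 0)

def get_condition_next_word_alt (ngram : List String) : List String × String :=
  let table := ngram.foldl gcnwB_step PySem.Dict.empty
  let result := ngram.map (gcnwB_apply table)
  (PySem.List.slice result none (some (-1)), (PySem.List.pyGet? result (-1)).getD "")

-- ===== PRECONDITION & SPEC =====
-- Pre_ excludes exactly the inputs where A raises: the empty list (IndexError on ngram[0]/ngram[-1])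
-- and any word containing two or more ':' (the 'assert len(items) == 2' fails).
def Pre_get_condition_next_word (ngram : List String) : Prop :=
  ngram ≠ [] ∧ ∀ w ∈ ngram, PySem.Str.count w ":" ≤ 1
instance (ngram : List String) : Decidable (Pre_get_condition_next_word ngram) := by
  unfold Pre_get_condition_next_word; infer_instance
def pvWitness_get_condition_next_word : List String := ["John:7", "ran", "to", "Mary:3", "John:7"]

def Spec_get_condition_next_word (ngram : List String) (out : List String × String) : Prop := out = get_condition_next_word_alt ngram
instance (ngram : List String) (out : List String × String) : Decidable (Spec_get_condition_next_word ngram out) := by unfold Spec_get_condition_next_word; infer_instance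

-- ===== CLAIM (what is proved, stated in full; the proofs are below) =====
def Claim_equal_get_condition_next_word : Prop := ∀ (ngram : List String), Dom_get_condition_next_word ngram → Pre_get_condition_next_word ngram → Spec_get_condition_next_word ngram (get_condition_next_word ngram)

-- ===== LEMMAS AND PROOFS =====

-- one table step preserves every existing binding
theorem gcnwB_step_get?_some (d : PySem.Dict String Int) (k : String) (v : Int) (w : String)
    (h : d.get? k = some v) : (gcnwB_step d w).get? k = some v := by
  simp only [gcnwB_step]
  split_ifs with h1 h2
  · exact h
  · have hk : k ≠ ((PySem.Str.split? w ":").getD []).getD 1 "" := by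
      intro he
      rw [← he] at h2
      rw [PySem.Dict.contains_eq_isSome_get?, h] at h2
      simp at h2
    rw [PySem.Dict.get?_insert_of_ne _ _ hk, h]
  · exact h

theorem gcnwB_build_get?_some (ws : List String) (d : PySem.Dict String Int) (k : String) (v : Int)
    (h : d.get? k = some v) : (ws.foldl gcnwB_step d).get? k = some v := by
  induction ws generalizing d with
  | nil => exact h
  | cons w t ih => exact ih _ (gcnwB_step_get?_some d k v w h)

theorem gcnwB_step_idem (d : PySem.Dict String Int) (w : String) :
    gcnwB_step (gcnwB_step d w) w = gcnwB_step d w := by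
  simp only [gcnwB_step]
  split_ifs <;> simp_all [PySem.Dict.contains_insert_self]

-- A's seeding from ngram[0] is one B table step from the empty dict
theorem gcnwA_seed_eq (s : String) :
    (if ((PySem.Str.split? s ":").getD []).length = 1 then (PySem.Dict.empty : PySem.Dict String Int)
     else PySem.Dict.empty.insert (((PySem.Str.split? s ":").getD []).getD 1 "")
       ((PySem.Dict.size (PySem.Dict.empty : PySem.Dict String Int) : Int)))
    = gcnwB_step PySem.Dict.empty s := by
  simp only [gcnwB_step]
  split_ifs <;> simp_all [PySem.Dict.contains_empty]

-- A's emit loop = B's table pass plus a map through any table agreeing with the final one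
theorem gcnwA_loop_eq (ws : List String) (D : PySem.Dict String Int) :
    ∀ (d : PySem.Dict String Int) (acc : List String),
    (∀ k v, (ws.foldl gcnwB_step d).get? k = some v → D.get? k = some v) →
    ws.foldl gcnwA_emitStep (d, acc) = (ws.foldl gcnwB_step d, acc ++ ws.map (gcnwB_apply D)) := by
  induction ws with
  | nil => intro d acc _; simp
  | cons w t ih =>
    intro d acc hD
    have hstep : List.foldl gcnwB_step d (w :: t) = t.foldl gcnwB_step (gcnwB_step d w) := rfl
    rw [hstep] at hD
    have hmain : gcnwA_emitStep (d, acc) w = (gcnwB_step d w, acc ++ [gcnwB_apply D w]) := by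
      simp only [gcnwA_emitStep, gcnwB_step, gcnwB_apply]
      by_cases h1 : ((PySem.Str.split? w ":").getD []).length = 1
      · simp [h1]
      · set e := ((PySem.Str.split? w ":").getD []).getD 1 "" with he
        by_cases h2 : d.contains e
        · obtain ⟨v, hv⟩ : ∃ v, d.get? e = some v := by
            rw [PySem.Dict.contains_eq_isSome_get?] at h2
            exact Option.isSome_iff_exists.mp h2
          have hDv : D.get? e = some v :=
            hD _ _ (gcnwB_build_get?_some t _ _ _ (by
              simp only [gcnwB_step]; rw [← he]; simp [h1, h2, hv]))
          simp [h1, h2, PySem.Dict.getD_eq_get?_getD, hv, hDv]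
        · have hv : (d.insert e ((PySem.Dict.size d : Int))).get? e
              = some ((PySem.Dict.size d : Int)) := PySem.Dict.get?_insert_self _ _ _
          have hDv : D.get? e = some ((PySem.Dict.size d : Int)) :=
            hD _ _ (gcnwB_build_get?_some t _ _ _ (by
              simp only [gcnwB_step]; rw [← he]; simp [h1, h2, hv]))
          simp [h1, h2, PySem.Dict.getD_eq_get?_getD, hv, hDv]
    rw [List.foldl_cons, hmain, List.foldl_cons, ih _ _ hD]
    simp

theorem pyGet?_concat_neg_one {α : Type} (l : List α) (a : α) :
    PySem.List.pyGet? (l ++ [a]) (-1) = some a := by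
  simp [PySem.List.pyGet?, PySem.List.pyIdx?]

-- ===== VERDICT (by name: the statement is the Claim_ definition above) =====
theorem get_condition_next_word_spec : Claim_equal_get_condition_next_word := by
  intro ngram _ hpre
  obtain ⟨hne, -⟩ := hpre
  obtain ⟨ys, last, rfl⟩ : ∃ ys last, ngram = ys ++ [last] := by
    rcases List.eq_nil_or_concat ngram with h | ⟨ys, last, h⟩
    · exact absurd h hne
    · exact ⟨ys, last, by simpa using h⟩
  unfold Spec_get_condition_next_word get_condition_next_word get_condition_next_word_alt
  simp only [PySem.List.slice_to_neg_one, pyGet?_concat_neg_one, List.dropLast_concat,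
    Option.getD_some]
  set D := (ys ++ [last]).foldl gcnwB_step PySem.Dict.empty with hDdef
  have hseed := gcnwA_seed_eq ((PySem.List.pyGet? (ys ++ [last]) 0).getD "")
  rw [hseed]
  set d0 := gcnwB_step PySem.Dict.empty ((PySem.List.pyGet? (ys ++ [last]) 0).getD "") with hd0
  -- the dict after A's loop, stepped once more by `last`, is B's full table D
  have hfinal : gcnwB_step (ys.foldl gcnwB_step d0) last = D := by
    cases ys with
    | nil =>
      have h0 : (PySem.List.pyGet? ([] ++ [last] : List String) 0).getD "" = last := by
        simp [PySem.List.pyGet?, PySem.List.pyIdx?]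
      rw [hDdef]
      simp only [List.nil_append, List.foldl_cons, List.foldl_nil]
      rw [hd0, h0, gcnwB_step_idem]
    | cons y t =>
      have hpos : (0 : Int) ≤ (t.length : Int) + 1 := by positivity
      have h0 : (PySem.List.pyGet? ((y :: t) ++ [last] : List String) 0).getD "" = y := by
        simp [PySem.List.pyGet?, PySem.List.pyIdx?, hpos]
      rw [hDdef, hd0, h0]
      simp only [List.cons_append, List.foldl_cons, List.foldl_append, List.foldl_cons,
        List.foldl_nil, gcnwB_step_idem]
  have hD : ∀ k v, (ys.foldl gcnwB_step d0).get? k = some v → D.get? k = some v := by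
    intro k v h
    rw [← hfinal]
    exact gcnwB_step_get?_some _ _ _ _ h
  rw [gcnwA_loop_eq ys D d0 [] hD]
  simp only [List.nil_append]
  rw [← hfinal]
  simp only [List.map_append, List.map_cons, List.map_nil, List.dropLast_concat,
    pyGet?_concat_neg_one, Option.getD_some]
  simp only [gcnwB_apply, gcnwB_step]
  split_ifs <;> rfl
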